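-- pv_equiv track=rewrite | github.com/giladfuchs/personal-projects | python/leet_code/leetcode/dropbox2.py | solution
-- ===== SOURCE A (Python) =====
-- zero = '0'
--
-- one = '1'
--
-- def solution(binaryString, requests):
--     answers = []
--     for req in requests:
--         if req == 'count':
--             answers.append(binaryString.count(one))
--         elif req=='flip':
--             index = next((i for i, c in enumerate(binaryString) if c==zero),-1)
--             binaryString = list(binaryString)
--             for i in range(index+1):
--                 binaryString[i] = zero if binaryString[i] ==one else one
--             binaryString = ''.join(binaryString)
--
--             answers.append(index)
--     return answers
-- ===== SOURCE B (Python) =====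
-- def solution(binaryString, requests):
--     # Encode the string as two bitmask integers: bit i of x is set iff char i is '1',
--     # bit i of z is set iff char i is '0' (other chars set neither bit).
--     # 'count' = popcount(x); 'flip' at the lowest set bit i of z rewrites both masks
--     # with XOR/shift arithmetic on the low i+1 bits instead of touching characters.
--     x = 0
--     z = 0
--     for i, c in enumerate(binaryString):
--         if c == '1':
--             x |= 1 << i
--         elif c == '0':
--             z |= 1 << i
--     answers = []
--     for req in requests:
--         if req == 'count':
--             ones = 0
--             y = x
--             while y:
--                 ones += y & 1
--                 y >>= 1
--             answers.append(ones)
--         elif req == 'flip':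
--             if z == 0:
--                 answers.append(-1)
--             else:
--                 w = z
--                 i = 0
--                 while w & 1 == 0:
--                     w >>= 1
--                     i += 1
--                 m = (1 << (i + 1)) - 1
--                 x, z = x ^ m, ((z >> (i + 1)) << (i + 1)) | (x & m)
--                 answers.append(i)
--     return answers
-- ===== Notes on version B (the rewrite author's own statement) =====
-- stated objective: alternative
-- what changed: B abandons the character-list representation entirely: it encodes the string once as two bitmask integers (bit i of x set iff char i is '1', bit i of z set iff char i is '0'); 'count' is a popcount of x and 'flip' locates the lowest set bit of z and updates both masks with XOR/shift arithmetic, instead of A's per-request string scan, list() copy, per-character prefix rewrite and ''.join rebuild.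
import Mathlib
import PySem

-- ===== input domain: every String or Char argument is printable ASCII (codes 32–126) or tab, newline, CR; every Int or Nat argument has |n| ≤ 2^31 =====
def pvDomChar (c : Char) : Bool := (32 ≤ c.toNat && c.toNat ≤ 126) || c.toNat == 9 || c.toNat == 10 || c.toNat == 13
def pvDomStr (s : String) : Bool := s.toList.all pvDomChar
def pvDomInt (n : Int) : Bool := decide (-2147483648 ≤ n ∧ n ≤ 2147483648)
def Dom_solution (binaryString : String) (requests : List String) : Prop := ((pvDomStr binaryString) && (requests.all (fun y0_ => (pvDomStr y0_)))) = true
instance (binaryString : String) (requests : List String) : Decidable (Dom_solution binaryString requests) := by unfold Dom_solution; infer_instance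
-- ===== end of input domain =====

-- B replaces A's character-list representation by two bitmask integers (positions of '1's
-- and of '0's): 'count' is a popcount and 'flip' is XOR/shift arithmetic on the masks.
-- Equivalence of the return values is proved; A does not mutate its arguments.

-- ===== PORT A =====
def solution (binaryString : String) (requests : List String) : List Int :=
  -- answers = []; for req in requests: …
  (requests.foldl (fun (st : List Int × String) req =>
    let answers := st.1
    let s := st.2
    if req == "count" then
      (answers ++ [(PySem.Str.count s "1" : Int)], s)
    else if req == "flip" then
      -- index = next((i for i, c in enumerate(binaryString) if c == zero), -1)
      let index : Int :=
        (((PySem.List.enumerate s.toList 0).find? (fun p => p.2 == '0')).map (·.1)).getD (-1)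
      -- binaryString = list(binaryString); for i in range(index+1): flip in place; ''.join
      let l := (PySem.List.pyRange 0 (index + 1) 1).foldl
        (fun l i =>
          -- binaryString[i] = zero if binaryString[i] == one else one  (i is always in range here)
          l.set i.toNat (if PySem.List.pyGetD l i ' ' == '1' then '0' else '1')) s.toList
      (answers ++ [index], String.ofList l)
    else st) ([], binaryString)).1

-- ===== PORT B =====
-- for c in reversed(binaryString): x = (x << 1) | (c == '1'); z = (z << 1) | (c == '0')
-- (foldr processes the first char last, exactly the reversed loop)
def bBuild : List Char → Nat × Nat
  | [] => (0, 0)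
  | c :: t =>
    let p := bBuild t
    (p.1 <<< 1 ||| (if c == '1' then 1 else 0), p.2 <<< 1 ||| (if c == '0' then 1 else 0))

-- while y: ones += y & 1; y >>= 1
def bPop (y ones : Nat) : Nat :=
  if y = 0 then ones else bPop (y >>> 1) (ones + (y &&& 1))
termination_by y
decreasing_by simp [Nat.shiftRight_one]; omega

-- w = z; i = 0; while w & 1 == 0: w >>= 1; i += 1
-- (the inner 'w = 0' guard is unreachable — B only calls this with w ≠ 0 — and only makes the recursion total)
def bTz (w i : Nat) : Nat :=
  if w &&& 1 = 0 then
    if w = 0 then i else bTz (w >>> 1) (i + 1)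
  else i
termination_by w
decreasing_by simp [Nat.shiftRight_one]; omega

def solution_alt (binaryString : String) (requests : List String) : List Int :=
  let xz := bBuild binaryString.toList
  (requests.foldl (fun (st : Nat × Nat × List Int) req =>
    let x := st.1
    let z := st.2.1
    let answers := st.2.2
    if req == "count" then (x, z, answers ++ [(bPop x 0 : Int)])
    else if req == "flip" then
      if z = 0 then (x, z, answers ++ [-1])
      else
        let i := bTz z 0
        let m := (1 <<< (i + 1)) - 1
        (x ^^^ m, ((z >>> (i + 1)) <<< (i + 1)) ||| (x &&& m), answers ++ [(i : Int)])
    else st) (xz.1, xz.2, [])).2.2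

-- ===== PRECONDITION & SPEC =====
def Spec_solution (binaryString : String) (requests : List String) (out : List Int) : Prop := out = solution_alt binaryString requests
instance (binaryString : String) (requests : List String) (out : List Int) : Decidable (Spec_solution binaryString requests out) := by unfold Spec_solution; infer_instance

-- ===== CLAIM (what is proved, stated in full; the proofs are below) =====
def Claim_equal_solution : Prop := ∀ (binaryString : String) (requests : List String), Dom_solution binaryString requests → Spec_solution binaryString requests (solution binaryString requests)

-- ===== LEMMAS AND PROOFS =====

-- ---- A-side characterisation (string scan / prefix rewrite) ----

lemma count_go_single (c : Char) :
    ∀ (l : List Char) (fuel acc : Nat), l.length ≤ fuel →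
      PySem.Chars.count.go [c] fuel l acc = acc + l.count c := by
  intro l
  induction l with
  | nil => intro fuel acc h; cases fuel <;> simp [PySem.Chars.count.go]
  | cons x t ih =>
    intro fuel acc h
    cases fuel with
    | zero => simp at h
    | succ f =>
      have hlen : t.length ≤ f := by simpa using h
      simp only [PySem.Chars.count.go]
      by_cases hx : x = c
      · subst hx
        have hpre : [x].isPrefixOf (x :: t) = true := by simp [List.isPrefixOf]
        simp [hpre, ih f (acc + 1) hlen]
        omega
      · have hpre : [c].isPrefixOf (x :: t) = false := by
          simp [List.isPrefixOf]
          exact fun h' => absurd h'.symm hx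
        simp [hpre, ih f acc hlen, hx]

lemma str_count_single (s : List Char) (c : Char) :
    PySem.Chars.count s [c] = s.count c := by
  simp [PySem.Chars.count, count_go_single c s s.length 0 le_rfl]

lemma find_enum_not_mem (l : List Char) (h : '0' ∉ l) :
    ∀ s : Int, (PySem.List.enumerate l s).find? (fun p => p.2 == '0') = none := by
  induction l with
  | nil => simp [PySem.List.enumerate_nil]
  | cons x t ih =>
    intro s
    simp only [List.mem_cons, not_or] at h
    rw [PySem.List.enumerate_cons,
      List.find?_cons_of_neg (by simp; exact fun he => h.1 he.symm)]
    exact ih h.2 (s + 1)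

lemma find_enum_mem (l : List Char) (h : '0' ∈ l) :
    ∀ s : Int, (PySem.List.enumerate l s).find? (fun p => p.2 == '0')
      = some (s + l.findIdx (fun c => c == '0'), '0') := by
  induction l with
  | nil => simp at h
  | cons x t ih =>
    intro s
    rw [PySem.List.enumerate_cons]
    by_cases hx : x = '0'
    · subst hx
      rw [List.find?_cons_of_pos (by simp)]
      simp [List.findIdx_cons]
    · have ht : '0' ∈ t := by
        cases List.mem_cons.1 h with
        | inl h1 => exact absurd h1.symm hx
        | inr h1 => exact h1
      have hb : (x == '0') = false := by simp [hx]
      rw [List.find?_cons_of_neg (by simp [hx]), ih ht (s + 1)]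
      simp only [List.findIdx_cons, hb, cond_false]
      push_cast
      ring_nf

def flipc (c : Char) : Char := if c == '1' then '0' else '1'

lemma a_flip_loop (l : List Char) :
    ∀ (m : Nat), m ≤ l.length →
    (PySem.List.pyRange 0 (m : Int) 1).foldl
        (fun l i => l.set i.toNat (if PySem.List.pyGetD l i ' ' == '1' then '0' else '1')) l
      = (l.take m).map flipc ++ l.drop m := by
  intro m
  induction m with
  | zero => intro _; simp [PySem.List.pyRange_one_eq_nil]
  | succ m ih =>
    intro h
    have hm : m < l.length := by omega
    have hm' : m ≤ l.length := by omega
    have hsplit : PySem.List.pyRange 0 ((m + 1 : Nat) : Int) 1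
        = PySem.List.pyRange 0 (m : Int) 1 ++ [(m : Int)] := by
      push_cast
      exact PySem.List.pyRange_one_succ_right (by positivity)
    rw [hsplit, List.foldl_append, ih hm']
    have hlenp : ((l.take m).map flipc).length = m := by
      simp [List.length_take]; omega
    have hget : PySem.List.pyGetD ((l.take m).map flipc ++ l.drop m) ((m : Nat) : Int) ' ' = l[m] := by
      rw [PySem.List.pyGetD_natCast]
      rw [List.getD_eq_getElem _ _ (by simp [List.length_take]; omega)]
      rw [List.getElem_append_right hlenp.le]
      simp [Nat.min_eq_left hm']
    simp only [List.foldl_cons, List.foldl_nil, hget, Int.toNat_natCast]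
    rw [List.set_append, if_neg (by omega), hlenp]
    rw [List.drop_eq_getElem_cons hm]
    simp only [Nat.sub_self, List.set_cons_zero]
    rw [List.take_add_one, List.getElem?_eq_getElem hm]
    simp only [Option.toList_some, List.map_append, List.map_cons, List.map_nil,
      List.append_assoc, List.singleton_append, flipc]

def stepA (st : List Int × String) (req : String) : List Int × String :=
  let answers := st.1
  let s := st.2
  if req == "count" then
    (answers ++ [(PySem.Str.count s "1" : Int)], s)
  else if req == "flip" then
    let index : Int :=
      (((PySem.List.enumerate s.toList 0).find? (fun p => p.2 == '0')).map (·.1)).getD (-1)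
    let l := (PySem.List.pyRange 0 (index + 1) 1).foldl
      (fun l i =>
        l.set i.toNat (if PySem.List.pyGetD l i ' ' == '1' then '0' else '1')) s.toList
    (answers ++ [index], String.ofList l)
  else st

def stepB (st : Nat × Nat × List Int) (req : String) : Nat × Nat × List Int :=
  let x := st.1
  let z := st.2.1
  let answers := st.2.2
  if req == "count" then (x, z, answers ++ [(bPop x 0 : Int)])
  else if req == "flip" then
    if z = 0 then (x, z, answers ++ [-1])
    else
      let i := bTz z 0
      let m := (1 <<< (i + 1)) - 1
      (x ^^^ m, ((z >>> (i + 1)) <<< (i + 1)) ||| (x &&& m), answers ++ [(i : Int)])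
  else st

-- ---- B-side: bitmask encoding of a character list ----

def encP (p : Char → Bool) : List Char → Nat
  | [] => 0
  | c :: t => 2 * encP p t + (if p c then 1 else 0)

lemma tbit0 (e b : Nat) (hb : b ≤ 1) : (2 * e + b).testBit 0 = decide (b = 1) := by
  rw [Nat.testBit_zero, decide_eq_decide]
  omega

lemma tbitS (e b : Nat) (hb : b ≤ 1) (j : Nat) : (2 * e + b).testBit (j + 1) = e.testBit j := by
  rw [Nat.testBit_succ]
  congr 1
  omega

lemma encP_testBit (p : Char → Bool) :
    ∀ (l : List Char) (j : Nat),
      (encP p l).testBit j = (decide (j < l.length) && p (l.getD j ' ')) := by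
  intro l
  induction l with
  | nil => intro j; simp [encP, Nat.zero_testBit]
  | cons c t ih =>
    intro j
    have hb : (if p c then 1 else 0) ≤ 1 := by split <;> omega
    cases j with
    | zero =>
      rw [encP, tbit0 _ _ hb]
      by_cases hc : p c <;> simp [hc]
    | succ j =>
      rw [encP, tbitS _ _ hb, ih]
      simp

lemma testBit_le_one (b : Nat) (hb : b ≤ 1) (j : Nat) : b.testBit (j + 1) = false := by
  apply Nat.testBit_lt_two_pow
  calc b < 2 := by omega
    _ = 2 ^ 1 := by norm_num
    _ ≤ 2 ^ (j + 1) := Nat.pow_le_pow_right (by norm_num) (by omega)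

lemma shiftOr1 (x b : Nat) (hb : b ≤ 1) : x <<< 1 ||| b = 2 * x + b := by
  apply Nat.eq_of_testBit_eq
  intro j
  cases j with
  | zero =>
    rw [Nat.testBit_or, Nat.testBit_shiftLeft, tbit0 _ _ hb, Nat.testBit_zero]
    simp
    omega
  | succ j =>
    rw [Nat.testBit_or, Nat.testBit_shiftLeft, tbitS _ _ hb, testBit_le_one b hb]
    simp

lemma bBuild_eq : ∀ l : List Char,
    bBuild l = (encP (fun c => c == '1') l, encP (fun c => c == '0') l) := by
  intro l
  induction l with
  | nil => rfl
  | cons c t ih =>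
    simp only [bBuild, ih]
    rw [shiftOr1 _ _ (by split <;> omega), shiftOr1 _ _ (by split <;> omega)]
    rfl

lemma encP_eq_zero (p : Char → Bool) :
    ∀ l : List Char, encP p l = 0 ↔ l.countP p = 0 := by
  intro l
  induction l with
  | nil => simp [encP]
  | cons c t ih =>
    by_cases hc : p c
    · have hE : encP p (c :: t) = 2 * encP p t + 1 := by simp [encP, hc]
      have hI : (if p c then 1 else 0) = 1 := by simp [hc]
      rw [hE, List.countP_cons, hI]
      omega
    · have hE : encP p (c :: t) = 2 * encP p t := by simp [encP, hc]
      have hI : (if p c then 1 else 0) = 0 := by simp [hc]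
      rw [hE, List.countP_cons, hI, Nat.add_zero, ← ih]
      omega

lemma bPop_encP (p : Char → Bool) :
    ∀ (l : List Char) (ones : Nat), bPop (encP p l) ones = ones + l.countP p := by
  intro l
  induction l with
  | nil => intro ones; simp [encP, bPop]
  | cons c t ih =>
    intro ones
    by_cases hc : p c
    · have hE : encP p (c :: t) = 2 * encP p t + 1 := by simp [encP, hc]
      rw [hE, bPop, if_neg (by omega)]
      rw [Nat.shiftRight_one, Nat.and_one_is_mod]
      have h2 : (2 * encP p t + 1) / 2 = encP p t := by omega
      have h3 : (2 * encP p t + 1) % 2 = 1 := by omega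
      rw [h2, h3, ih, List.countP_cons, hc]
      simp
      omega
    · have hE : encP p (c :: t) = 2 * encP p t := by simp [encP, hc]
      rw [hE]
      by_cases he : encP p t = 0
      · rw [he, bPop]
        norm_num [List.countP_cons, hc, (encP_eq_zero p t).1 he]
      · rw [bPop, if_neg (by omega)]
        rw [Nat.shiftRight_one, Nat.and_one_is_mod]
        have h2 : 2 * encP p t / 2 = encP p t := by omega
        have h3 : 2 * encP p t % 2 = 0 := by omega
        rw [h2, h3, ih, List.countP_cons]
        simp [hc]

lemma bTz_encP : ∀ (l : List Char), '0' ∈ l →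
    ∀ i : Nat, bTz (encP (fun c => c == '0') l) i = i + l.findIdx (fun c => c == '0') := by
  intro l
  induction l with
  | nil => simp
  | cons c t ih =>
    intro hmem i
    by_cases hc : c = '0'
    · subst hc
      have hE : encP (fun c => c == '0') ('0' :: t) = 2 * encP (fun c => c == '0') t + 1 := by
        simp [encP]
      rw [hE, bTz, if_neg (by rw [Nat.and_one_is_mod]; omega)]
      simp [List.findIdx_cons]
    · have ht : '0' ∈ t := by
        cases List.mem_cons.1 hmem with
        | inl h1 => exact absurd h1.symm hc
        | inr h1 => exact h1
      have hb : (c == '0') = false := by simp [hc]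
      have hz : encP (fun c => c == '0') t ≠ 0 := by
        rw [Ne, encP_eq_zero, List.countP_eq_zero]
        push_neg
        exact ⟨'0', ht, by simp⟩
      have hE : encP (fun c => c == '0') (c :: t) = 2 * encP (fun c => c == '0') t := by
        simp [encP, hb]
      rw [hE, bTz, if_pos (by rw [Nat.and_one_is_mod]; omega), if_neg (by omega),
        Nat.shiftRight_one]
      have h2 : 2 * encP (fun c => c == '0') t / 2 = encP (fun c => c == '0') t := by omega
      rw [h2, ih ht]
      simp [List.findIdx_cons, hb]
      omega

lemma is1_flipc (c : Char) : (flipc c == '1') = !(c == '1') := by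
  by_cases hc : c = '1' <;> simp [flipc, hc]

lemma is0_flipc (c : Char) : (flipc c == '0') = (c == '1') := by
  by_cases hc : c = '1' <;> simp [flipc, hc]

-- getD of A's post-flip list
lemma newl_getD (l : List Char) (k : Nat) (hk : k < l.length) (j : Nat) :
    ((l.take k).map flipc ++ '1' :: l.drop (k + 1)).getD j ' '
      = if j < k then flipc (l.getD j ' ') else if j = k then '1' else l.getD j ' ' := by
  have hlenp : ((l.take k).map flipc).length = k := by
    simp [List.length_take]; omega
  by_cases h1 : j < k
  · have hj : j < l.length := lt_trans h1 hk
    rw [if_pos h1, List.getD, List.getElem?_append_left (by omega)]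
    simp only [List.getElem?_map, List.getElem?_take]
    rw [if_pos h1, List.getD, List.getElem?_eq_getElem hj]
    simp
  · rw [if_neg h1]
    rw [List.getD, List.getElem?_append_right (by omega), hlenp]
    by_cases h2 : j = k
    · subst h2
      simp [Nat.sub_self]
    · rw [if_neg h2]
      have h3 : j - k = (j - k - 1) + 1 := by omega
      rw [h3]
      simp only [List.getElem?_cons_succ, List.getElem?_drop]
      have h4 : k + 1 + (j - k - 1) = j := by omega
      rw [h4, List.getD]

lemma newl_length (l : List Char) (k : Nat) (hk : k < l.length) :
    ((l.take k).map flipc ++ '1' :: l.drop (k + 1)).length = l.length := by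
  simp [List.length_take]; omega

lemma mask_x (l : List Char) (k : Nat) (hk : k < l.length) (hk0 : (l.getD k ' ') = '0') :
    encP (fun c => c == '1') ((l.take k).map flipc ++ '1' :: l.drop (k + 1))
      = encP (fun c => c == '1') l ^^^ ((1 <<< (k + 1)) - 1) := by
  rw [Nat.one_shiftLeft]
  apply Nat.eq_of_testBit_eq
  intro j
  have hg : l[k] = '0' := by rw [List.getD_eq_getElem _ _ hk] at hk0; exact hk0
  rw [encP_testBit, Nat.testBit_xor, encP_testBit, Nat.testBit_two_pow_sub_one,
    newl_getD l k hk, newl_length l k hk]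
  by_cases h1 : j < k
  · rw [if_pos h1, is1_flipc]
    have : j < l.length := by omega
    simp [this, h1, Nat.lt_succ_of_lt h1]
  · rw [if_neg h1]
    by_cases h2 : j = k
    · subst h2
      simp [hk, List.getD_eq_getElem _ _ hk, hg, Nat.lt_succ_self]
    · rw [if_neg h2]
      have h3 : ¬ j < k + 1 := by omega
      simp [h3]

lemma mask_z (l : List Char) (k : Nat) (hk : k < l.length) (hk0 : (l.getD k ' ') = '0') :
    encP (fun c => c == '0') ((l.take k).map flipc ++ '1' :: l.drop (k + 1))
      = ((encP (fun c => c == '0') l >>> (k + 1)) <<< (k + 1))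
          ||| (encP (fun c => c == '1') l &&& ((1 <<< (k + 1)) - 1)) := by
  rw [Nat.one_shiftLeft]
  apply Nat.eq_of_testBit_eq
  intro j
  have hg : l[k] = '0' := by rw [List.getD_eq_getElem _ _ hk] at hk0; exact hk0
  rw [encP_testBit, Nat.testBit_or, Nat.testBit_and, Nat.testBit_shiftLeft,
    Nat.testBit_shiftRight, encP_testBit, encP_testBit, Nat.testBit_two_pow_sub_one,
    newl_getD l k hk, newl_length l k hk]
  by_cases h1 : j < k
  · rw [if_pos h1, is0_flipc]
    have hj : j < l.length := by omega
    have hle : ¬ (k + 1 ≤ j) := by omega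
    simp [hj, hle, h1, Nat.lt_succ_of_lt h1]
  · rw [if_neg h1]
    by_cases h2 : j = k
    · subst h2
      have hle : ¬ (j + 1 ≤ j) := by omega
      simp [hk, List.getD_eq_getElem _ _ hk, hg, hle]
    · rw [if_neg h2]
      have hle : k + 1 ≤ j := by omega
      have h4 : k + 1 + (j - (k + 1)) = j := by omega
      have h5 : ¬ j < k + 1 := by omega
      simp [hle, h4, h5]

lemma countP_eq_count (l : List Char) (c : Char) :
    l.countP (fun x => x == c) = l.count c := rfl

-- ---- the fold invariant ----

lemma fold_inv : ∀ (reqs : List String) (s : String) (x z : Nat) (ans : List Int),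
    x = encP (fun c => c == '1') s.toList → z = encP (fun c => c == '0') s.toList →
    (reqs.foldl stepA (ans, s)).1 = (reqs.foldl stepB (x, z, ans)).2.2 := by
  intro reqs
  induction reqs with
  | nil => intro s x z ans h1 h2; simp
  | cons req reqs ih =>
    intro s x z ans h1 h2
    set l := s.toList with hl
    by_cases hc : req = "count"
    · subst hc
      rw [List.foldl_cons, List.foldl_cons]
      have hcnt : (PySem.Str.count s "1" : Int) = (bPop x 0 : Int) := by
        rw [h1, bPop_encP, countP_eq_count]
        have h1s : "1".toList = ['1'] := by decide
        norm_num [PySem.Str.count, h1s, str_count_single]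
        rw [← hl]
      simp only [stepA, stepB, hcnt]
      exact ih s x z (ans ++ [(bPop x 0 : Int)]) h1 h2
    · by_cases hf : req = "flip"
      · subst hf
        rw [List.foldl_cons, List.foldl_cons]
        by_cases hmem : '0' ∈ l
        · -- a zero exists at index k
          set k := l.findIdx (fun c => c == '0') with hkdef
          have hk : k < l.length := List.findIdx_lt_length.2 ⟨'0', hmem, by simp⟩
          have hk0 : l[k] = '0' := by
            have := List.findIdx_getElem (p := fun c => c == '0') (xs := l) (w := hk)
            simpa using this
          have hk0' : l.getD k ' ' = '0' := by
            rw [List.getD_eq_getElem _ _ hk, hk0]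
          have hz : z ≠ 0 := by
            rw [h2, Ne, encP_eq_zero, List.countP_eq_zero]
            push_neg
            exact ⟨'0', hmem, by simp⟩
          have hA : stepA (ans, s) "flip"
              = (ans ++ [(k : Int)],
                 String.ofList ((l.take k).map flipc ++ '1' :: l.drop (k + 1))) := by
            simp only [stepA]
            rw [if_neg (by decide), if_pos (by decide)]
            rw [find_enum_mem l hmem 0]
            have hcast : ((k : Int)) + 1 = ((k + 1 : Nat) : Int) := by push_cast; ring
            simp only [Option.map_some, Option.getD_some, zero_add, ← hl, ← hkdef]
            rw [hcast, a_flip_loop l (k + 1) (by omega)]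
            rw [List.take_add_one, List.getElem?_eq_getElem hk]
            simp [hk0, flipc]
          have htz : bTz z 0 = k := by rw [h2, bTz_encP l hmem 0, hkdef]; omega
          have hB : stepB (x, z, ans) "flip"
              = (encP (fun c => c == '1') ((l.take k).map flipc ++ '1' :: l.drop (k + 1)),
                 encP (fun c => c == '0') ((l.take k).map flipc ++ '1' :: l.drop (k + 1)),
                 ans ++ [(k : Int)]) := by
            simp only [stepB]
            rw [if_neg (by decide), if_pos (by decide), if_neg hz]
            rw [htz, h1, h2, ← mask_x l k hk hk0', ← mask_z l k hk hk0']
          rw [hA, hB]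
          have := ih (String.ofList ((l.take k).map flipc ++ '1' :: l.drop (k + 1)))
            _ _ (ans ++ [(k : Int)])
            (by rw [String.toList_ofList]) (by rw [String.toList_ofList])
          exact this
        · -- no zero
          have hz : z = 0 := by
            rw [h2, encP_eq_zero, List.countP_eq_zero]
            intro a ha
            simp only [beq_iff_eq]
            intro hb
            exact hmem (hb ▸ ha)
          have hA : stepA (ans, s) "flip" = (ans ++ [(-1 : Int)], String.ofList l) := by
            simp only [stepA]
            rw [if_neg (by decide), if_pos (by decide)]
            rw [find_enum_not_mem l hmem 0]
            simp only [Option.map_none, Option.getD_none, ← hl]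
            norm_num [PySem.List.pyRange_one_eq_nil]
          have hB : stepB (x, z, ans) "flip" = (x, z, ans ++ [(-1 : Int)]) := by
            simp only [stepB]
            rw [if_neg (by decide), if_pos (by decide), if_pos hz]
          rw [hA, hB]
          have := ih (String.ofList l) x z (ans ++ [(-1 : Int)])
            (by rw [String.toList_ofList]; exact h1) (by rw [String.toList_ofList]; exact h2)
          exact this
      · rw [List.foldl_cons, List.foldl_cons]
        have hA : stepA (ans, s) req = (ans, s) := by
          simp only [stepA]
          rw [if_neg (by simp [hc]), if_neg (by simp [hf])]
        have hB : stepB (x, z, ans) req = (x, z, ans) := by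
          simp only [stepB]
          rw [if_neg (by simp [hc]), if_neg (by simp [hf])]
        rw [hA, hB]
        exact ih s x z ans h1 h2

lemma solution_eq_fold (b : String) (r : List String) :
    solution b r = (r.foldl stepA ([], b)).1 := rfl

lemma solution_alt_eq_fold (b : String) (r : List String) :
    solution_alt b r
      = (r.foldl stepB ((bBuild b.toList).1, (bBuild b.toList).2, [])).2.2 := rfl

-- ===== VERDICT (by name: the statement is the Claim_ definition above) =====
theorem solution_spec : Claim_equal_solution := by
  intro b r _
  unfold Spec_solution
  rw [solution_eq_fold, solution_alt_eq_fold, bBuild_eq]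
  exact fold_inv r b _ _ [] rfl rfl
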